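-- pv_equiv track=rewrite | github.com/laurentluce/python-algorithms | algorithms/tests/test_a_star_path_finding.py | from_sketch
-- ===== SOURCE A (Python) =====
-- def from_sketch(sketch):
--     walls = []
--     path = []
--     start = None
--     end = None
--     y = 0
--     for r in sketch:
--         x = 0
--         for c in r:
--             if c == '.':
--                 path.append((x, y))
--             if c == '#':
--                 walls.append((x, y))
--             if c == '[':
--                 start = (x, y)
--                 path.append((x, y))
--             if c == ']':
--                 end = (x, y)
--                 path.append((x, y))
--             if c == '(':
--                 start = (x, y)
--             if c == ')':
--                 end = (x, y)
--             x += 1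
--         y += 1
--     return walls, path, start, end
-- ===== SOURCE B (Python) =====
-- def from_sketch(sketch):
--     cells = [(x, y, c) for y, row in enumerate(sketch) for x, c in enumerate(row)]
--     walls = [(x, y) for x, y, c in cells if c == '#']
--     path = [(x, y) for x, y, c in cells if c in '.[]']
--     start = next(((x, y) for x, y, c in reversed(cells) if c in '(['), None)
--     end = next(((x, y) for x, y, c in reversed(cells) if c in ')]'), None)
--     return walls, path, start, end
-- ===== Notes on version B (the rewrite author's own statement) =====
-- stated objective: alternative
-- what changed: Replaces the single interleaved stateful scan with an enumerated cell index plus per-result filtered passes; start/end become last-match searches over the reversed cell list instead of repeated reassignment.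
import Mathlib
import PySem

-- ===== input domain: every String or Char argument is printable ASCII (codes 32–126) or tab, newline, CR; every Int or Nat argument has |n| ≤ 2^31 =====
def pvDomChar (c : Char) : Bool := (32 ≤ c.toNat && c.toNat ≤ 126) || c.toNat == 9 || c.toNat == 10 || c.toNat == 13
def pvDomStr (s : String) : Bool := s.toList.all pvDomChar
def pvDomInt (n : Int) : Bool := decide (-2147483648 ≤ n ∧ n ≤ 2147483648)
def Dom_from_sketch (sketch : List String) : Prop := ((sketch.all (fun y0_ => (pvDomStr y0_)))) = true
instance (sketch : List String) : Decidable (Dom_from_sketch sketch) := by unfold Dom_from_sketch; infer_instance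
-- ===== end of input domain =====

-- B replaces A's single interleaved stateful scan by an enumerated cell index plus one
-- filtered pass per result (start/end = last match over the reversed cells); objective:
-- alternative decomposition, same cost.

-- ===== PORT A =====
-- state: (walls, path, start, end)
def pvStepA (x y : Int)
    (acc : (List (Int × Int)) × (List (Int × Int)) × (Option (Int × Int)) × (Option (Int × Int)))
    (c : Char) :
    (List (Int × Int)) × (List (Int × Int)) × (Option (Int × Int)) × (Option (Int × Int)) :=
  let walls := acc.1
  let path := acc.2.1
  let s := acc.2.2.1
  let e := acc.2.2.2
  let path := if c = '.' then path ++ [(x, y)] else path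
  let walls := if c = '#' then walls ++ [(x, y)] else walls
  let s := if c = '[' then some (x, y) else s
  let path := if c = '[' then path ++ [(x, y)] else path
  let e := if c = ']' then some (x, y) else e
  let path := if c = ']' then path ++ [(x, y)] else path
  let s := if c = '(' then some (x, y) else s
  let e := if c = ')' then some (x, y) else e
  (walls, path, s, e)

-- one outer-loop iteration of A: inner loop over the row (x counter), then y += 1
def pvRowStep
    (p : ((List (Int × Int)) × (List (Int × Int)) × (Option (Int × Int)) × (Option (Int × Int))) × Int)
    (row : String) :
    ((List (Int × Int)) × (List (Int × Int)) × (Option (Int × Int)) × (Option (Int × Int))) × Int :=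
  ((row.toList.foldl (fun q c => (pvStepA q.2 p.2 q.1 c, q.2 + 1)) (p.1, (0 : Int))).1, p.2 + 1)

def from_sketch (sketch : List String) : (List (Int × Int)) × (List (Int × Int)) × (Option (Int × Int)) × (Option (Int × Int)) :=
  (sketch.foldl pvRowStep
    ((([], [], none, none) :
        (List (Int × Int)) × (List (Int × Int)) × (Option (Int × Int)) × (Option (Int × Int))),
     (0 : Int))).1

-- ===== PORT B =====
def pvEnumFrom {α : Type} (i : Int) : List α → List (Int × α)
  | [] => []
  | a :: t => (i, a) :: pvEnumFrom (i + 1) t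

-- cells = [(x, y, c) for y, row in enumerate(sketch) for x, c in enumerate(row)]
def pvCellsFrom (j : Int) (sketch : List String) : List (Int × Int × Char) :=
  (pvEnumFrom j sketch).flatMap
    (fun yr => (pvEnumFrom 0 yr.2.toList).map (fun xc => (xc.1, yr.1, xc.2)))

def pvWallsOf (cs : List (Int × Int × Char)) : List (Int × Int) :=
  (cs.filter (fun t => t.2.2 == '#')).map (fun t => (t.1, t.2.1))

def pvPathOf (cs : List (Int × Int × Char)) : List (Int × Int) :=
  (cs.filter (fun t => t.2.2 == '.' || t.2.2 == '[' || t.2.2 == ']')).map (fun t => (t.1, t.2.1))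

def pvStartOf (cs : List (Int × Int × Char)) : Option (Int × Int) :=
  (cs.reverse.find? (fun t => t.2.2 == '(' || t.2.2 == '[')).map (fun t => (t.1, t.2.1))

def pvEndOf (cs : List (Int × Int × Char)) : Option (Int × Int) :=
  (cs.reverse.find? (fun t => t.2.2 == ')' || t.2.2 == ']')).map (fun t => (t.1, t.2.1))

def from_sketch_alt (sketch : List String) : (List (Int × Int)) × (List (Int × Int)) × (Option (Int × Int)) × (Option (Int × Int)) :=
  let cells := pvCellsFrom 0 sketch
  (pvWallsOf cells, pvPathOf cells, pvStartOf cells, pvEndOf cells)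

-- ===== PRECONDITION & SPEC =====
def Spec_from_sketch (sketch : List String) (out : (List (Int × Int)) × (List (Int × Int)) × (Option (Int × Int)) × (Option (Int × Int))) : Prop := out = from_sketch_alt sketch
instance (sketch : List String) (out : (List (Int × Int)) × (List (Int × Int)) × (Option (Int × Int)) × (Option (Int × Int))) : Decidable (Spec_from_sketch sketch out) := by unfold Spec_from_sketch; infer_instance

-- ===== CLAIM (what is proved, stated in full; the proofs are below) =====
def Claim_equal_from_sketch : Prop := ∀ (sketch : List String), Dom_from_sketch sketch → Spec_from_sketch sketch (from_sketch sketch)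

-- ===== LEMMAS AND PROOFS =====

def pvFoldCells
    (acc : (List (Int × Int)) × (List (Int × Int)) × (Option (Int × Int)) × (Option (Int × Int)))
    (cs : List (Int × Int × Char)) :
    (List (Int × Int)) × (List (Int × Int)) × (Option (Int × Int)) × (Option (Int × Int)) :=
  cs.foldl (fun a t => pvStepA t.1 t.2.1 a t.2.2) acc

lemma pvStepA_eq (x y : Int)
    (acc : (List (Int × Int)) × (List (Int × Int)) × (Option (Int × Int)) × (Option (Int × Int)))
    (c : Char) :
    pvStepA x y acc c =
      (acc.1 ++ (if c == '#' then [(x, y)] else []),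
       acc.2.1 ++ (if c == '.' || c == '[' || c == ']' then [(x, y)] else []),
       (if c == '(' || c == '[' then some (x, y) else none).or acc.2.2.1,
       (if c == ')' || c == ']' then some (x, y) else none).or acc.2.2.2) := by
  obtain ⟨w, p, s, e⟩ := acc
  simp only [pvStepA, beq_iff_eq, Bool.or_eq_true]
  split_ifs <;> simp_all

lemma pvLast_cons (pred : (Int × Int × Char) → Bool) (t : Int × Int × Char)
    (cs : List (Int × Int × Char)) :
    ((t :: cs).reverse.find? pred).map (fun t => (t.1, t.2.1)) =
      (Option.map (fun t => (t.1, t.2.1)) (cs.reverse.find? pred)).or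
        (if pred t then some (t.1, t.2.1) else none) := by
  rw [List.reverse_cons, List.find?_append]
  cases h : cs.reverse.find? pred <;> simp [List.find?] <;> split_ifs <;> simp_all

lemma pvFoldCells_eq (cs : List (Int × Int × Char)) :
    ∀ acc : (List (Int × Int)) × (List (Int × Int)) × (Option (Int × Int)) × (Option (Int × Int)),
      pvFoldCells acc cs =
        (acc.1 ++ pvWallsOf cs, acc.2.1 ++ pvPathOf cs,
         (pvStartOf cs).or acc.2.2.1, (pvEndOf cs).or acc.2.2.2) := by
  induction cs with
  | nil => intro acc; simp [pvFoldCells, pvWallsOf, pvPathOf, pvStartOf, pvEndOf]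
  | cons t cs ih =>
    intro acc
    have h1 : pvFoldCells acc (t :: cs) = pvFoldCells (pvStepA t.1 t.2.1 acc t.2.2) cs := rfl
    rw [h1, ih, pvStepA_eq]
    obtain ⟨x, y, c⟩ := t
    refine Prod.ext ?_ (Prod.ext ?_ (Prod.ext ?_ ?_))
    · simp [pvWallsOf, List.filter_cons]; split_ifs <;> simp
    · simp [pvPathOf, List.filter_cons]; split_ifs <;> simp
    · simp only [pvStartOf, pvLast_cons, Option.or_assoc]
    · simp only [pvEndOf, pvLast_cons, Option.or_assoc]

lemma pvRow_eq (row : List Char) :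
    ∀ (i y : Int)
      (acc : (List (Int × Int)) × (List (Int × Int)) × (Option (Int × Int)) × (Option (Int × Int))),
      row.foldl (fun q c => (pvStepA q.2 y q.1 c, q.2 + 1)) (acc, i) =
        (pvFoldCells acc ((pvEnumFrom i row).map (fun xc => (xc.1, y, xc.2))),
         i + (row.length : Int)) := by
  induction row with
  | nil => intro i y acc; simp [pvEnumFrom, pvFoldCells]
  | cons c row ih =>
    intro i y acc
    have h := ih (i + 1) y (pvStepA i y acc c)
    simp only [List.foldl_cons, h, pvEnumFrom, List.map_cons, pvFoldCells, List.length_cons,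
      Prod.mk.injEq]
    refine ⟨trivial, ?_⟩
    push_cast
    ring

lemma pvSketch_eq (sk : List String) :
    ∀ (j : Int)
      (acc : (List (Int × Int)) × (List (Int × Int)) × (Option (Int × Int)) × (Option (Int × Int))),
      sk.foldl pvRowStep (acc, j) = (pvFoldCells acc (pvCellsFrom j sk), j + (sk.length : Int)) := by
  induction sk with
  | nil => intro j acc; simp [pvCellsFrom, pvEnumFrom, pvFoldCells]
  | cons row sk ih =>
    intro j acc
    have hstep : pvRowStep (acc, j) row =
        (pvFoldCells acc ((pvEnumFrom (0 : Int) row.toList).map (fun xc => (xc.1, j, xc.2))),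
         j + 1) := by
      unfold pvRowStep
      rw [pvRow_eq]
    have hcells : pvCellsFrom j (row :: sk) =
        ((pvEnumFrom (0 : Int) row.toList).map (fun xc => (xc.1, j, xc.2))) ++
          pvCellsFrom (j + 1) sk := rfl
    rw [List.foldl_cons, hstep, ih, hcells]
    refine Prod.ext ?_ ?_
    · simp [pvFoldCells, List.foldl_append]
    · simp
      ring

-- ===== VERDICT (by name: the statement is the Claim_ definition above) =====
theorem from_sketch_spec : Claim_equal_from_sketch := by
  intro sketch _
  unfold Spec_from_sketch from_sketch from_sketch_alt
  rw [pvSketch_eq]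
  rw [pvFoldCells_eq]
  simp
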